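-- pv_equiv track=rewrite | github.com/seasonstar/atmquant | core/data/downloader.py | parse_vt_symbol
-- ===== SOURCE A (Python) =====
-- def parse_vt_symbol(vt_symbol: str) -> tuple:
--     """
--     解析vnpy格式的合约代码
--
--     Returns:
--         (exchange, symbol, month)
--     """
--     if '.' not in vt_symbol:
--         return None, None, None
--
--     symbol_month, exchange = vt_symbol.split('.')
--
--     # 找到数字开始的位置
--     last_idx = -1
--     while last_idx >= -len(symbol_month) and symbol_month[last_idx].isdigit():
--         last_idx -= 1
--
--     if last_idx == -1:
--         # 没有数字，可能是主连或加权合约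
--         return exchange, symbol_month, None
--
--     symbol = symbol_month[:last_idx + 1]
--     month = symbol_month[last_idx + 1:]
--
--     return exchange, symbol, month
-- ===== SOURCE B (Python) =====
-- def parse_vt_symbol(vt_symbol: str) -> tuple:
--     """
--     解析vnpy格式的合约代码
--
--     Returns:
--         (exchange, symbol, month)
--     """
--     if '.' not in vt_symbol:
--         return None, None, None
--
--     symbol_month, exchange = vt_symbol.split('.')
--
--     # single forward pass with two accumulators: digits go into a buffer;
--     # any non-digit flushes the buffer into the symbol part, so at the end
--     # the buffer holds exactly the maximal trailing digit run (the month)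
--     sym_chars = []
--     digit_buf = []
--     for ch in symbol_month:
--         if ch.isdigit():
--             digit_buf.append(ch)
--         else:
--             sym_chars.extend(digit_buf)
--             sym_chars.append(ch)
--             digit_buf = []
--
--     symbol = ''.join(sym_chars)
--     month = ''.join(digit_buf)
--     return exchange, symbol, month if month else None
-- ===== Notes on version B (the rewrite author's own statement) =====
-- stated objective: alternative
-- what changed: Replaces A's backward negative-index digit-scan plus slicing with a single forward pass over the characters maintaining two accumulators (symbol chars and a digit buffer flushed on every non-digit), so no index arithmetic or slicing is needed; empty month buffer maps to None.
-- outside the precondition, e.g. on parse_vt_symbol('a.b.c'): A raises ValueError, B raises ValueError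
import Mathlib
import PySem

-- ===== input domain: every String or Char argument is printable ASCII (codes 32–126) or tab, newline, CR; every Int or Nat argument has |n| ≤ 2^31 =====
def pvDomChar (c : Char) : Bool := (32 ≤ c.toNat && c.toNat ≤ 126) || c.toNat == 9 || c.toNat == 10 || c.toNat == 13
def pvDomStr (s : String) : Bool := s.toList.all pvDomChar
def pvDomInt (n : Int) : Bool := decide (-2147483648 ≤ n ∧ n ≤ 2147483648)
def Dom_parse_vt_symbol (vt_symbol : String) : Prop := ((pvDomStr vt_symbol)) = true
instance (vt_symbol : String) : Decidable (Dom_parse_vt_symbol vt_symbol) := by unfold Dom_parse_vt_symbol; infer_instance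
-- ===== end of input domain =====

-- B replaces A's backward negative-index digit-scan and slicing with one forward
-- fold over the characters carrying two accumulators (symbol chars, digit buffer
-- flushed by every non-digit); objective: alternative, same cost.


-- ===== PORT A =====
-- the backward while loop: while last_idx >= -len(sm) and sm[last_idx].isdigit(): last_idx -= 1
-- ported with fuel (the loop runs at most len(sm) times starting from -1)
def pvScanA (cs : List Char) : Nat → Int → Int
  | 0, idx => idx
  | fuel + 1, idx =>
    if idx ≥ -(cs.length : Int) then
      match PySem.List.pyGet? cs idx with
      | some c => if PySem.Chars.isdigit c then pvScanA cs fuel (idx - 1) else idx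
      | none => idx
    else idx

def parse_vt_symbol (vt_symbol : String) : Option String × Option String × Option String :=
  if PySem.Str.isIn "." vt_symbol = false then (none, none, none)
  else
    match PySem.Str.split? vt_symbol "." with
    | some [symbol_month, exchange] =>
      let cs := symbol_month.toList
      let last_idx := pvScanA cs (cs.length + 1) (-1)
      if last_idx = -1 then (some exchange, some symbol_month, none)
      else
        let symbol := PySem.List.slice cs none (some (last_idx + 1))
        let month := PySem.List.slice cs (some (last_idx + 1)) none
        (some exchange, some (String.ofList symbol), some (String.ofList month))
    | _ => (none, none, none)   -- more than one dot: Python raises ValueError; outside Pre_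

-- ===== PORT B =====
-- Source B's forward loop body: digits are appended to the buffer, a non-digit
-- flushes buffer (+ itself) into the symbol accumulator
def pvStepB (st : List Char × List Char) (c : Char) : List Char × List Char :=
  if PySem.Chars.isdigit c then (st.1, st.2 ++ [c]) else (st.1 ++ st.2 ++ [c], [])

def parse_vt_symbol_alt (vt_symbol : String) : Option String × Option String × Option String :=
  if PySem.Str.isIn "." vt_symbol = false then (none, none, none)
  else
    let parts := (PySem.Str.split? vt_symbol ".").getD []
    if parts.length = 2 then
      let symbol_month := parts[0]!
      let exchange := parts[1]!
      let st := symbol_month.toList.foldl pvStepB ([], [])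
      (some exchange, some (String.ofList st.1),
        if st.2.isEmpty then none else some (String.ofList st.2))
    else (none, none, none)   -- more than one dot: Python raises ValueError; outside Pre_

-- ===== PRECONDITION & SPEC =====
-- Pre_ excludes exactly the inputs with two or more dot separators, on which both
-- A and B raise ValueError at the 2-tuple unpacking of the dot split.
def Pre_parse_vt_symbol (vt_symbol : String) : Prop := PySem.Str.count vt_symbol "." ≤ 1
instance (vt_symbol : String) : Decidable (Pre_parse_vt_symbol vt_symbol) := by unfold Pre_parse_vt_symbol; infer_instance
def pvWitness_parse_vt_symbol : String := "rb2301.SHFE"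

def Spec_parse_vt_symbol (vt_symbol : String) (out : Option String × Option String × Option String) : Prop := out = parse_vt_symbol_alt vt_symbol
instance (vt_symbol : String) (out : Option String × Option String × Option String) : Decidable (Spec_parse_vt_symbol vt_symbol out) := by unfold Spec_parse_vt_symbol; infer_instance

-- ===== CLAIM (what is proved, stated in full; the proofs are below) =====
def Claim_equal_parse_vt_symbol : Prop := ∀ (vt_symbol : String), Dom_parse_vt_symbol vt_symbol → Pre_parse_vt_symbol vt_symbol → Spec_parse_vt_symbol vt_symbol (parse_vt_symbol vt_symbol)

-- ===== LEMMAS AND PROOFS =====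

-- the backward scan ends at -(j+1+m) where m is the trailing-digit run of cs seen from offset j
lemma pvScanA_spec (cs : List Char) (fuel j : Nat)
    (hfuel : ((cs.reverse.drop j).takeWhile (fun c => PySem.Chars.isdigit c)).length < fuel) :
    pvScanA cs fuel (-(j + 1 : Int)) =
      -((j : Int) + 1 + ((cs.reverse.drop j).takeWhile (fun c => PySem.Chars.isdigit c)).length) := by
  induction fuel generalizing j with
  | zero => omega
  | succ f ih =>
    unfold pvScanA
    by_cases hj : j < cs.length
    · have hj' : j < cs.reverse.length := by simpa using hj
      have hk : (-(j + 1 : Int)) = -(((j + 1 : Nat)) : Int) := by norm_num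
      have hget : PySem.List.pyGet? cs (-(j + 1 : Int)) = some (cs.reverse[j]'hj') := by
        rw [hk, PySem.List.pyGet?_neg_natCast cs (j + 1) (by omega) (by omega)]
        have hidx : cs.length - (j + 1) = cs.length - 1 - j := by omega
        rw [hidx, List.getElem?_eq_getElem (by omega), List.getElem_reverse]
      have hge : (-(j + 1 : Int)) ≥ -(cs.length : Int) := by omega
      rw [if_pos hge, hget]
      show (if PySem.Chars.isdigit (cs.reverse[j]'hj') = true then pvScanA cs f (-(j + 1 : Int) - 1)
            else -(j + 1 : Int)) = _
      have hdrop : cs.reverse.drop j = cs.reverse[j]'hj' :: cs.reverse.drop (j + 1) :=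
        (List.getElem_cons_drop hj').symm
      by_cases hd : PySem.Chars.isdigit (cs.reverse[j]'hj') = true
      · have htw : (cs.reverse.drop j).takeWhile (fun c => PySem.Chars.isdigit c)
            = cs.reverse[j]'hj' :: (cs.reverse.drop (j + 1)).takeWhile (fun c => PySem.Chars.isdigit c) := by
          rw [hdrop, List.takeWhile_cons, if_pos hd]
        have hlen : ((cs.reverse.drop j).takeWhile (fun c => PySem.Chars.isdigit c)).length
            = ((cs.reverse.drop (j + 1)).takeWhile (fun c => PySem.Chars.isdigit c)).length + 1 := by
          rw [htw]; simp
        have hrec := ih (j + 1) (by omega)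
        rw [if_pos hd]
        have harg : (-(j + 1 : Int)) - 1 = -((j + 1 : Nat) + 1 : Int) := by push_cast; ring_nf
        rw [harg, hrec, hlen]
        push_cast; ring
      · have htw : (cs.reverse.drop j).takeWhile (fun c => PySem.Chars.isdigit c) = [] := by
          rw [hdrop, List.takeWhile_cons, if_neg hd]
        rw [if_neg hd, htw]
        simp
    · have hdrop : cs.reverse.drop j = [] := by
        apply List.drop_eq_nil_of_le; simpa using Nat.le_of_not_lt hj
      have hlt : ¬ ((-(j + 1 : Int)) ≥ -(cs.length : Int)) := by omega
      rw [if_neg hlt, hdrop]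
      simp

-- dropWhile is drop of the takeWhile length
lemma pvDropWhile_eq_drop (l : List Char) (p : Char → Bool) :
    l.dropWhile p = l.drop (l.takeWhile p).length := by
  induction l with
  | nil => simp
  | cons a t ih =>
    by_cases h : p a
    · simp [h, ih]
    · simp [h]

-- B's fold computes (non-digit-ending prefix, maximal trailing digit run)
lemma pvFoldB_spec (l : List Char) :
    l.foldl pvStepB ([], []) =
      ((l.reverse.dropWhile (fun c => PySem.Chars.isdigit c)).reverse,
       (l.reverse.takeWhile (fun c => PySem.Chars.isdigit c)).reverse) := by
  induction l using List.reverseRecOn with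
  | nil => simp
  | append_singleton l c ih =>
    rw [List.foldl_append, ih, List.foldl_cons, List.foldl_nil]
    by_cases hd : PySem.Chars.isdigit c = true
    · simp [pvStepB, hd]
    · have hsplit : (l.reverse.dropWhile (fun c => PySem.Chars.isdigit c)).reverse
          ++ (l.reverse.takeWhile (fun c => PySem.Chars.isdigit c)).reverse = l := by
        rw [← List.reverse_append, List.takeWhile_append_dropWhile, List.reverse_reverse]
      simp only [pvStepB, hd, Bool.false_eq_true, ite_false, List.reverse_append,
        List.reverse_singleton, List.singleton_append, List.takeWhile_cons,
        List.dropWhile_cons, List.reverse_nil]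
      rw [hsplit]
      simp

-- the two per-branch computations agree
lemma pv_main_branch (sm ex : String) :
    (if pvScanA sm.toList (sm.toList.length + 1) (-1) = -1
     then ((some ex : Option String), some sm, (none : Option String))
     else (some ex,
       some (String.ofList (PySem.List.slice sm.toList none
         (some (pvScanA sm.toList (sm.toList.length + 1) (-1) + 1)))),
       some (String.ofList (PySem.List.slice sm.toList
         (some (pvScanA sm.toList (sm.toList.length + 1) (-1) + 1)) none))))
    = ((some ex : Option String),
       some (String.ofList (sm.toList.foldl pvStepB ([], [])).1),
       if (sm.toList.foldl pvStepB ([], [])).2.isEmpty then (none : Option String)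
       else some (String.ofList (sm.toList.foldl pvStepB ([], [])).2)) := by
  set cs := sm.toList with hcs
  set k := ((cs.reverse.drop 0).takeWhile (fun c => PySem.Chars.isdigit c)).length with hkdef
  have hkle : k ≤ cs.length := by
    have h := (List.takeWhile_prefix (l := cs.reverse.drop 0)
      (p := fun c => PySem.Chars.isdigit c)).length_le
    rw [hkdef]
    simpa using h
  have hscan : pvScanA cs (cs.length + 1) (-1) = -(0 + 1 + (k : Int)) := by
    have hk0 : (-1 : Int) = -((0 : Nat) + 1 : Int) := by norm_num
    rw [hk0]
    exact pvScanA_spec cs (cs.length + 1) 0 (by omega)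
  have hfold := pvFoldB_spec cs
  have hsym : (cs.foldl pvStepB ([], [])).1 = cs.take (cs.length - k) := by
    rw [hfold]
    have hdw : cs.reverse.dropWhile (fun c => PySem.Chars.isdigit c)
        = cs.reverse.drop k := by
      rw [hkdef]
      simp [pvDropWhile_eq_drop]
    rw [hdw, List.reverse_drop, List.reverse_reverse, List.length_reverse]
  have hmonlen : (cs.foldl pvStepB ([], [])).2.length = k := by
    rw [hfold]; rw [hkdef]; simp
  have hmon : (cs.foldl pvStepB ([], [])).2 = cs.drop (cs.length - k) := by
    have happ : (cs.foldl pvStepB ([], [])).1 ++ (cs.foldl pvStepB ([], [])).2 = cs := by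
      rw [hfold, ← List.reverse_append, List.takeWhile_append_dropWhile, List.reverse_reverse]
    have : cs.take (cs.length - k) ++ (cs.foldl pvStepB ([], [])).2
        = cs.take (cs.length - k) ++ cs.drop (cs.length - k) := by
      rw [List.take_append_drop, ← hsym, happ]
    exact List.append_cancel_left this
  by_cases hk : k = 0
  · have hc : (-(0 + 1 + (k : Int))) = -1 := by rw [hk]; norm_num
    have hempty : (cs.foldl pvStepB ([], [])).2.isEmpty = true := by
      rw [List.isEmpty_iff, ← List.length_eq_zero_iff, hmonlen, hk]
    rw [hscan, hc, if_pos rfl, hempty, hsym, hk, Nat.sub_zero, List.take_length]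
    simp [hcs, String.ofList_toList]
  · have hc : (-(0 + 1 + (k : Int))) ≠ -1 := by omega
    rw [hscan, if_neg hc]
    have hstop : (-(0 + 1 + (k : Int))) + 1 = -((k : Nat) : Int) := by push_cast; ring
    rw [hstop, PySem.List.slice_to_neg_natCast cs k (by omega),
        PySem.List.slice_from_neg_natCast cs k (by omega)]
    have hempty : (cs.foldl pvStepB ([], [])).2.isEmpty = false := by
      rw [List.isEmpty_eq_false_iff]
      intro h
      have := congrArg List.length h
      rw [hmonlen] at this
      simp at this
      omega
    rw [hempty, hsym, hmon]
    simp

-- ===== VERDICT (by name: the statement is the Claim_ definition above) =====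
theorem parse_vt_symbol_spec : Claim_equal_parse_vt_symbol := by
  intro s hdom hpre
  unfold Spec_parse_vt_symbol
  simp only [parse_vt_symbol, parse_vt_symbol_alt]
  by_cases h : PySem.Str.isIn "." s = false
  · rw [if_pos h, if_pos h]
  · rw [if_neg h, if_neg h]
    cases hsp : PySem.Str.split? s "." with
    | none => rfl
    | some parts =>
      match parts with
      | [] => rfl
      | [a] => rfl
      | [a, b] => simpa using pv_main_branch a b
      | a :: b :: c :: rest => rfl
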